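-- pv_equiv track=rewrite | github.com/0xDEADCODED/AdventOfCode | 2016/4/sol.py | sort_counts
-- ===== SOURCE A (Python) =====
-- def sort_counts(cnts):
--     cnts = sorted(cnts,key=lambda x: x[1],reverse=True)
--     for n in range(len(cnts) - 1, 0, -1):
--         swapped = False
--         for i in range(n):
--             if cnts[i][1] == cnts[i+1][1] and cnts[i][0] > cnts[i + 1][0]:
--                 cnts[i], cnts[i + 1] = cnts[i + 1], cnts[i]
--                 swapped = True
--
--         if not swapped: break
--     return cnts
-- ===== SOURCE B (Python) =====
-- def sort_counts(cnts):
--     buckets = {}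
--     for name, c in cnts:
--         if c not in buckets:
--             buckets[c] = []
--         buckets[c].append(name)
--     out = []
--     for c in sorted(buckets.keys(), reverse=True):
--         for name in sorted(buckets[c]):
--             out.append((name, c))
--     return out
-- ===== Notes on version B (the rewrite author's own statement) =====
-- stated objective: idiomatic
-- what changed: Replaced A's sort-by-count followed by a bubble-sort pass that swaps equal-count neighbours out of key order with a one-pass bucketing by count, then emitting buckets in descending count order with each bucket's names sorted ascending.
import Mathlib
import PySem

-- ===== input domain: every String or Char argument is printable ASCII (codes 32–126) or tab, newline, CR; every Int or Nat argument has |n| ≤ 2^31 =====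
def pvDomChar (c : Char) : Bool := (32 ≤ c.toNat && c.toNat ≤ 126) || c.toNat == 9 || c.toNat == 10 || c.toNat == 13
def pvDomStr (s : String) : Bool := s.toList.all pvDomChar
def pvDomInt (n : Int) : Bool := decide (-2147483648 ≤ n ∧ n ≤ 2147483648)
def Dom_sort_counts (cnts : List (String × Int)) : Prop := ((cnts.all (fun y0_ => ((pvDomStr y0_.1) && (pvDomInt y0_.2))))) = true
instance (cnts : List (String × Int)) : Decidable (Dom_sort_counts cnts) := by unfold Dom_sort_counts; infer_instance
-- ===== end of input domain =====

-- B replaces A's sort-by-count plus tie-fixing bubble passes with one-pass bucketing by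
-- count, then emits counts in descending order, each bucket's names sorted ascending
-- (idiomatic; equivalence is about the return value — A does not mutate its argument).

-- ===== PORT A =====
-- inner 'for i in range(n)': one bubble pass over the first n adjacent pairs,
-- returning (new list, swapped flag)
def pvPass : List (String × Int) → Nat → List (String × Int) × Bool
  | l, 0 => (l, false)
  | [], _ + 1 => ([], false)
  | [a], _ + 1 => ([a], false)
  | a :: b :: t, n + 1 =>
    if a.2 = b.2 ∧ b.1 < a.1 then
      let r := pvPass (a :: t) n
      (b :: r.1, true)
    else
      let r := pvPass (b :: t) n
      (a :: r.1, r.2)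

def pvLoop : List (String × Int) → Nat → List (String × Int)
  | l, 0 => l
  | l, n + 1 =>
    let r := pvPass l (n + 1)
    if r.2 then pvLoop r.1 n else r.1

-- key-order propagation along an equal-count run

def sort_counts (cnts : List (String × Int)) : List (String × Int) :=
  pvLoop (PySem.List.sorted cnts (fun x => x.2) true) (cnts.length - 1)

-- ===== PORT B =====
def sort_counts_alt (cnts : List (String × Int)) : List (String × Int) :=
  let buckets := cnts.foldl (fun d p => d.modify p.2 [] (fun l => l ++ [p.1])) (PySem.Dict.empty)
  (PySem.List.sorted buckets.keys (fun c => c) true).foldl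
    (fun out c =>
      (PySem.List.sorted (buckets.getD c []) (fun n => n) false).foldl
        (fun out n => out ++ [(n, c)]) out) []

-- ===== PRECONDITION & SPEC =====
def Spec_sort_counts (cnts : List (String × Int)) (out : List (String × Int)) : Prop := out = sort_counts_alt cnts
instance (cnts : List (String × Int)) (out : List (String × Int)) : Decidable (Spec_sort_counts cnts out) := by unfold Spec_sort_counts; infer_instance

-- ===== CLAIM (what is proved, stated in full; the proofs are below) =====
def Claim_equal_sort_counts : Prop := ∀ (cnts : List (String × Int)), Dom_sort_counts cnts → Spec_sort_counts cnts (sort_counts cnts)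

-- ===== LEMMAS AND PROOFS =====

def pvNoS (a b : String × Int) : Prop := ¬ (a.2 = b.2 ∧ b.1 < a.1)

theorem pvPass_perm (n : Nat) (l : List (String × Int)) : (pvPass l n).1.Perm l := by
  induction n generalizing l with
  | zero => simp [pvPass]
  | succ n ih =>
    match l with
    | [] => simp [pvPass]
    | [a] => simp [pvPass]
    | a :: b :: t =>
      simp only [pvPass]
      split
      · exact ((ih (a :: t)).cons b).trans (List.Perm.swap a b t)
      · exact (ih (b :: t)).cons a

theorem pvPass_snd (n : Nat) (l : List (String × Int)) :
    (pvPass l n).1.map (·.2) = l.map (·.2) := by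
  induction n generalizing l with
  | zero => simp [pvPass]
  | succ n ih =>
    match l with
    | [] => simp [pvPass]
    | [a] => simp [pvPass]
    | a :: b :: t =>
      simp only [pvPass]
      split
      · rename_i h
        simp [ih (a :: t), h.1]
      · simp [ih (b :: t)]

theorem pvPass_split (n : Nat) (l : List (String × Int)) :
    pvPass l n = ((pvPass (l.take (n+1)) n).1 ++ l.drop (n+1), (pvPass (l.take (n+1)) n).2) := by
  induction n generalizing l with
  | zero => cases l <;> simp [pvPass]
  | succ n ih =>
    match l with
    | [] => simp [pvPass]
    | [a] => simp [pvPass]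
    | a :: b :: t =>
      simp only [List.take_succ_cons, List.drop_succ_cons, pvPass]
      split
      · rename_i h
        have := ih (a :: t)
        simp only [List.take_succ_cons, List.drop_succ_cons] at this
        simp [this]
      · rename_i h
        have := ih (b :: t)
        simp only [List.take_succ_cons, List.drop_succ_cons] at this
        simp [this]

theorem pvPass_noswap (n : Nat) (l : List (String × Int)) (h : (pvPass l n).2 = false) :
    (pvPass l n).1 = l ∧ List.IsChain pvNoS (l.take (n+1)) := by
  induction n generalizing l with
  | zero =>
    refine ⟨rfl, ?_⟩
    cases l <;> simp
  | succ n ih =>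
    match l with
    | [] => simp [pvPass]
    | [a] => simp [pvPass]
    | a :: b :: t =>
      simp only [pvPass] at h
      split at h
      · simp at h
      · rename_i hc
        simp only at h
        obtain ⟨h1, h2⟩ := ih (b :: t) h
        constructor
        · simp only [pvPass]
          rw [if_neg hc]
          simp [h1]
        · rw [List.take_succ_cons, List.take_succ_cons]
          rw [List.take_succ_cons] at h2
          exact List.isChain_cons_cons.2 ⟨hc, h2⟩

def pvCge (a b : String × Int) : Prop := b.2 ≤ a.2

theorem pvPass_last (n : Nat) (m : List (String × Int)) (hlen : m.length ≤ n + 1)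
    (hc : m.Pairwise pvCge) (ys : List (String × Int)) (L : String × Int)
    (hq : (pvPass m n).1 = ys ++ [L]) :
    ∀ x ∈ m, x.2 = L.2 → x.1 ≤ L.1 := by
  induction n generalizing m ys with
  | zero =>
    -- m.length ≤ 1
    match m with
    | [] => simp [pvPass] at hq
    | [a] =>
      simp [pvPass] at hq
      have : L = a := by
        cases ys with
        | nil => simpa using hq.symm
        | cons y ys' => simp at hq
      intro x hx _
      simp at hx
      subst hx; subst this; exact le_refl _
    | a :: b :: t => simp at hlen
  | succ n ih =>
    match m with
    | [] => simp [pvPass] at hq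
    | [a] =>
      simp only [pvPass] at hq
      have : L = a := by
        cases ys with
        | nil => simpa using hq.symm
        | cons y ys' => simp at hq
      intro x hx _
      simp at hx
      subst hx; subst this; exact le_refl _
    | a :: b :: t =>
      simp only [List.length_cons] at hlen
      rcases hc with - | ⟨ha, hbt⟩
      simp only [pvPass] at hq
      by_cases hcond : a.2 = b.2 ∧ b.1 < a.1
      · rw [if_pos hcond] at hq
        simp only at hq
        cases ys with
        | nil =>
          exfalso
          simp only [List.nil_append] at hq
          have hp := (pvPass_perm n (a :: t)).length_eq
          have : (pvPass (a :: t) n).1 = [] := by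
            cases hq' : (pvPass (a :: t) n).1 with
            | nil => rfl
            | cons z zs => rw [hq'] at hq; simp at hq
          rw [this] at hp; simp at hp
        | cons y ys' =>
          simp only [List.cons_append, List.cons.injEq] at hq
          have hpa : (a :: t).Pairwise pvCge := by
            rcases hbt with - | ⟨hb', ht⟩
            exact List.Pairwise.cons (fun y hy => ha y (List.mem_cons_of_mem _ hy)) ht
          have IH := ih (a :: t) (by simp at hlen ⊢; omega) hpa ys' hq.2
          intro x hx hxe
          simp only [List.mem_cons] at hx
          rcases hx with rfl | rfl | hx
          · exact IH x (List.mem_cons_self) hxe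
          · have : a.2 = L.2 := hcond.1.trans hxe
            exact le_of_lt (lt_of_lt_of_le hcond.2 (IH a (List.mem_cons_self) this))
          · exact IH x (List.mem_cons_of_mem _ hx) hxe
      · rw [if_neg hcond] at hq
        simp only at hq
        cases ys with
        | nil =>
          exfalso
          simp only [List.nil_append] at hq
          have hp := (pvPass_perm n (b :: t)).length_eq
          have : (pvPass (b :: t) n).1 = [] := by
            cases hq' : (pvPass (b :: t) n).1 with
            | nil => rfl
            | cons z zs => rw [hq'] at hq; simp at hq
          rw [this] at hp; simp at hp
        | cons y ys' =>
          simp only [List.cons_append, List.cons.injEq] at hq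
          have IH := ih (b :: t) (by simp at hlen ⊢; omega) hbt ys' hq.2
          intro x hx hxe
          simp only [List.mem_cons] at hx
          rcases hx with rfl | hx
          · -- x = a
            have hL : L ∈ b :: t := (pvPass_perm n (b :: t)).mem_iff.1 (by rw [hq.2]; simp)
            have hLa : L.2 ≤ x.2 := ha L hL
            have hba : L.2 ≤ b.2 := by
              rcases List.mem_cons.1 hL with h' | h'
              · rw [h']
              · rcases hbt with - | ⟨hb', ht⟩
                exact hb' L h'
            have hab : b.2 ≤ x.2 := ha b List.mem_cons_self
            have heb : x.2 = b.2 := by omega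
            have hk : x.1 ≤ b.1 := by
              by_contra hgt
              exact hcond ⟨heb, lt_of_not_ge hgt⟩
            have : b.2 = L.2 := by omega
            exact le_trans hk (IH b List.mem_cons_self this)
          · exact IH x (List.mem_cons.2 hx) hxe

theorem pvKeyChain (t : List (String × Int)) : ∀ (a : String × Int),
    (a :: t).Pairwise pvCge → List.IsChain pvNoS (a :: t) →
    ∀ b ∈ t, a.2 = b.2 → a.1 ≤ b.1 := by
  induction t with
  | nil => intro a _ _ b hb; simp at hb
  | cons c t' ih =>
    intro a hp hch b hb he
    rcases hp with - | ⟨ha, hct⟩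
    rw [List.isChain_cons_cons] at hch
    have hac : a.2 = c.2 → a.1 ≤ c.1 := by
      intro h'
      by_contra hgt
      exact hch.1 ⟨h', lt_of_not_ge hgt⟩
    rcases List.mem_cons.1 hb with rfl | hb'
    · exact hac he
    · have hcb : c.2 ≤ a.2 := ha c List.mem_cons_self
      have hbc : b.2 ≤ c.2 := by
        rcases hct with - | ⟨hc', ht⟩
        exact hc' b hb'
      have he1 : a.2 = c.2 := by omega
      have he2 : c.2 = b.2 := by omega
      exact le_trans (hac he1) (ih c hct hch.2 b hb' he2)

def pvR (a b : String × Int) : Prop := b.2 < a.2 ∨ (a.2 = b.2 ∧ a.1 ≤ b.1)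

theorem pvChain_pairwise (l : List (String × Int)) (hc : l.Pairwise pvCge)
    (h : List.IsChain pvNoS l) : l.Pairwise pvR := by
  induction l with
  | nil => simp
  | cons a t ih =>
    rcases hc with - | ⟨ha, ht⟩
    refine List.Pairwise.cons ?_ (ih ht ?_)
    · intro b hb
      have hba : b.2 ≤ a.2 := ha b hb
      rcases lt_or_eq_of_le hba with hlt | heq
      · exact Or.inl hlt
      · exact Or.inr ⟨heq.symm, pvKeyChain t a (List.Pairwise.cons ha ht) h b hb heq.symm⟩
    · cases t with
      | nil => simp
      | cons c t' => exact (List.isChain_cons_cons.1 h).2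

theorem pvCge_of_map {l₁ l₂ : List (String × Int)} (h : l₁.map (·.2) = l₂.map (·.2))
    (hp : l₂.Pairwise pvCge) : l₁.Pairwise pvCge := by
  have h2 : (l₂.map (·.2)).Pairwise (fun x y => y ≤ x) := List.pairwise_map.2 hp
  rw [← h] at h2
  have := List.pairwise_map.1 h2
  exact this

theorem pvLoop_good (k : Nat) : ∀ (m s : List (String × Int)), m.length = k + 1 →
    (m ++ s).Pairwise pvCge → List.IsChain pvNoS s →
    (∀ x ∈ m, ∀ y ∈ s, x.2 = y.2 → x.1 ≤ y.1) →
    List.IsChain pvNoS (pvLoop (m ++ s) k) ∧ (pvLoop (m ++ s) k).Perm (m ++ s) ∧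
      (pvLoop (m ++ s) k).map (·.2) = (m ++ s).map (·.2) := by
  induction k with
  | zero =>
    intro m s hm hc hs hb
    match m, hm with
    | [a], _ =>
      refine ⟨?_, List.Perm.refl _, rfl⟩
      show List.IsChain pvNoS ([a] ++ s)
      rw [List.singleton_append, List.isChain_cons]
      refine ⟨?_, hs⟩
      intro y hy
      have hy' : y ∈ s := List.mem_of_mem_head? hy
      rintro ⟨he, hlt⟩
      exact absurd hlt (not_lt.2 (hb a List.mem_cons_self y hy' he))
  | succ n ih =>
    intro m s hm hc hs hb
    have hsplit := pvPass_split (n+1) (m ++ s)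
    have htake : (m ++ s).take (n+1+1) = m := by
      rw [← hm]; exact List.take_left ..
    have hdrop : (m ++ s).drop (n+1+1) = s := by
      rw [← hm]; exact List.drop_left ..
    rw [htake, hdrop] at hsplit
    have hstep : pvLoop (m ++ s) (n+1) =
        if (pvPass m (n+1)).2 then pvLoop ((pvPass m (n+1)).1 ++ s) n
        else (pvPass m (n+1)).1 ++ s := by
      simp only [pvLoop, hsplit]
    by_cases hf : (pvPass m (n+1)).2
    · rw [hstep, if_pos hf]
      set q := (pvPass m (n+1)).1 with hqdef
      have hqperm : q.Perm m := pvPass_perm (n+1) m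
      have hqlen : q.length = n + 2 := by rw [hqperm.length_eq, hm]
      have hqne : q ≠ [] := by intro h0; rw [h0] at hqlen; simp at hqlen
      set L := q.getLast hqne with hLdef
      set m' := q.dropLast with hm'def
      have hqdecomp : m' ++ [L] = q := List.dropLast_concat_getLast hqne
      have hqs : q ++ s = m' ++ (L :: s) := by rw [← hqdecomp]; simp
      have hmap : (q ++ s).map (·.2) = (m ++ s).map (·.2) := by
        simp only [List.map_append]
        rw [pvPass_snd (n+1) m]
      have hc' : (q ++ s).Pairwise pvCge := pvCge_of_map hmap hc
      have hLm : L ∈ m := hqperm.mem_iff.1 (List.getLast_mem hqne)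
      have hmpw : m.Pairwise pvCge := (List.pairwise_append.1 hc).1
      have hlast := pvPass_last (n+1) m (by omega) hmpw m' L hqdecomp.symm
      have hm'len : m'.length = n + 1 := by
        rw [hm'def, List.length_dropLast, hqlen]
        omega
      have hchainLs : List.IsChain pvNoS (L :: s) := by
        rw [List.isChain_cons]
        refine ⟨?_, hs⟩
        intro y hy
        rintro ⟨he, hlt⟩
        exact absurd hlt (not_lt.2 (hb L hLm y (List.mem_of_mem_head? hy) he))
      have hb' : ∀ x ∈ m', ∀ y ∈ (L :: s), x.2 = y.2 → x.1 ≤ y.1 := by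
        intro x hx y hy he
        have hxm : x ∈ m := hqperm.mem_iff.1 (by rw [← hqdecomp]; exact List.mem_append_left _ hx)
        rcases List.mem_cons.1 hy with rfl | hy'
        · exact hlast x hxm he
        · exact hb x hxm y hy' he
      have IH := ih m' (L :: s) hm'len (by rw [← hqs]; exact hc') hchainLs hb'
      rw [hqs]
      refine ⟨IH.1, ?_, ?_⟩
      · exact IH.2.1.trans (by rw [← hqs]; exact hqperm.append_right s)
      · rw [IH.2.2, ← hqs, hmap]
    · rw [hstep, if_neg hf]
      have hns := pvPass_noswap (n+1) m (by simpa using hf)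
      rw [hns.1]
      refine ⟨?_, List.Perm.refl _, rfl⟩
      rw [List.isChain_append]
      refine ⟨?_, hs, ?_⟩
      · have := hns.2
        rwa [List.take_of_length_le (by omega)] at this
      · intro x hx y hy
        rintro ⟨he, hlt⟩
        exact absurd hlt (not_lt.2 (hb x (List.mem_of_mem_getLast? hx) y (List.mem_of_mem_head? hy) he))

theorem pvA_main (cnts : List (String × Int)) :
    (sort_counts cnts).Perm cnts ∧ (sort_counts cnts).Pairwise pvR := by
  unfold sort_counts
  have hperm : (PySem.List.sorted cnts (fun x => x.2) true).Perm cnts :=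
    PySem.List.sorted_perm cnts (fun x => x.2) true
  have hpw : (PySem.List.sorted cnts (fun x => x.2) true).Pairwise pvCge :=
    PySem.List.sorted_pairwise_rev cnts (fun x => x.2)
  cases hn : cnts.length with
  | zero =>
    have h0 : (PySem.List.sorted cnts (fun x => x.2) true).length = 0 := by
      rw [hperm.length_eq, hn]
    rw [List.length_eq_zero_iff] at h0
    simp only [pvLoop]
    exact ⟨hperm, by rw [h0]; simp⟩
  | succ k =>
    have hlen : (PySem.List.sorted cnts (fun x => x.2) true).length = k + 1 := by
      rw [hperm.length_eq, hn]
    have hg := pvLoop_good k (PySem.List.sorted cnts (fun x => x.2) true) [] hlen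
      (by simpa using hpw) (by simp) (by simp)
    rw [List.append_nil] at hg
    simp only [Nat.succ_sub_one]
    exact ⟨hg.2.1.trans hperm, pvChain_pairwise _ (pvCge_of_map hg.2.2 hpw) hg.1⟩

theorem pvR_antisymm (a b : String × Int) (h1 : pvR a b) (h2 : pvR b a) : a = b := by
  rcases h1 with h | ⟨e1, k1⟩ <;> rcases h2 with h' | ⟨e2, k2⟩
  · exact absurd h' (by omega)
  · exact absurd h (by omega)
  · exact absurd h' (by omega)
  · have : a.1 = b.1 := le_antisymm k1 k2
    cases a; cases b
    simp only at this e1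
    rw [this, e1]

def pvBucket (cnts : List (String × Int)) (c : Int) : List String :=
  (cnts.filter (fun p => p.2 == c)).map (·.1)

def pvDict (cnts : List (String × Int)) : PySem.Dict Int (List String) :=
  cnts.foldl (fun d p => d.modify p.2 [] (fun l => l ++ [p.1])) (PySem.Dict.empty)

theorem pvDict_getD (cnts : List (String × Int)) (c : Int) :
    (pvDict cnts).getD c [] = pvBucket cnts c := by
  unfold pvDict
  have h1 : cnts.foldl (fun d p => d.modify p.2 [] (fun l => l ++ [p.1])) PySem.Dict.empty
      = (cnts.map Prod.swap).foldl (fun d p => d.modify p.1 [] (fun l => l ++ [p.2])) PySem.Dict.empty := by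
    rw [List.foldl_map]
    rfl
  rw [h1, PySem.Dict.getD_foldl_modify_append]
  simp only [List.filter_map, List.map_map, pvBucket]
  rfl

theorem pvDict_keys_nodup (cnts : List (String × Int)) : (pvDict cnts).keys.Nodup := by
  unfold pvDict
  exact PySem.Dict.nodup_keys_foldl_modify_key cnts (fun p => p.2) []
    (fun _ p => (fun l => l ++ [p.1])) PySem.Dict.empty (by simp [PySem.Dict.keys_empty])

theorem pvDict_keys_mem (cnts : List (String × Int)) (c : Int) :
    c ∈ (pvDict cnts).keys ↔ c ∈ cnts.map (·.2) := by
  unfold pvDict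
  rw [PySem.Dict.keys_foldl_modify_key cnts (fun p => p.2) []
    (fun _ p => (fun l => l ++ [p.1])) PySem.Dict.empty]
  rw [PySem.Set.mem_update]
  simp [PySem.Dict.keys_empty]

theorem pvB_eq (cnts : List (String × Int)) :
    sort_counts_alt cnts =
      (PySem.List.sorted (pvDict cnts).keys (fun c => c) true).flatMap
        (fun c => (PySem.List.sorted (pvBucket cnts c) (fun n => n) false).map (fun n => (n, c))) := by
  show (PySem.List.sorted (pvDict cnts).keys (fun c => c) true).foldl
      (fun out c =>
        (PySem.List.sorted ((pvDict cnts).getD c []) (fun n => n) false).foldl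
          (fun out n => out ++ [(n, c)]) out) [] = _
  have h1 : (fun (out : List (String × Int)) (c : Int) =>
      (PySem.List.sorted ((pvDict cnts).getD c []) (fun n => n) false).foldl
        (fun out n => out ++ [(n, c)]) out)
      = fun out c => out ++ (PySem.List.sorted (pvBucket cnts c) (fun n => n) false).map (fun n => (n, c)) := by
    funext out c
    rw [pvDict_getD, PySem.List.foldl_append_singleton_eq_map]
  rw [h1, PySem.List.foldl_append_eq_flatMap]
  simp

theorem pvCover (K : List Int) : ∀ (l : List (String × Int)), K.Nodup →
    (∀ p ∈ l, p.2 ∈ K) →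
    (K.flatMap (fun c => l.filter (fun p => p.2 == c))).Perm l := by
  induction K with
  | nil =>
    intro l _ hcov
    cases l with
    | nil => simp
    | cons p l' => exact absurd (hcov p List.mem_cons_self) (by simp)
  | cons c K' ih =>
    intro l hnd hcov
    rcases hnd with - | ⟨hcK, hnd'⟩
    have hrest : ∀ c' ∈ K', l.filter (fun p => p.2 == c')
        = (l.filter (fun p => !(p.2 == c))).filter (fun p => p.2 == c') := by
      intro c' hc'
      rw [List.filter_filter]
      apply List.filter_congr
      intro x _
      by_cases h : x.2 = c'
      · have : ¬ c' = c := fun he => (hcK c' hc') he.symm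
        simp [h, this]
      · simp [h]
    rw [List.flatMap_cons, List.flatMap_congr hrest]
    have ihh := ih (l.filter (fun p => !(p.2 == c))) hnd' ?cov
    case cov =>
      intro p hp
      rcases List.mem_filter.1 hp with ⟨hpl, hpc⟩
      rcases List.mem_cons.1 (hcov p hpl) with h' | h'
      · exfalso; simp [h'] at hpc
      · exact h'
    exact (ihh.append_left (l.filter (fun p => p.2 == c))).trans
      (List.filter_append_perm (fun p => p.2 == c) l)

theorem pvB_perm (cnts : List (String × Int)) : (sort_counts_alt cnts).Perm cnts := by
  rw [pvB_eq]
  have hg : ∀ c : Int, ((PySem.List.sorted (pvBucket cnts c) (fun n => n) false).map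
      (fun n => (n, c))).Perm (cnts.filter (fun p => p.2 == c)) := by
    intro c
    have h1 := (PySem.List.sorted_perm (pvBucket cnts c) (fun n => n) false).map (fun n => ((n : String), c))
    have h2 : (pvBucket cnts c).map (fun n => (n, c)) = cnts.filter (fun p => p.2 == c) := by
      unfold pvBucket
      rw [List.map_map]
      have hid : ∀ p ∈ cnts.filter (fun p => p.2 == c),
          ((fun n => ((n : String), c)) ∘ (fun x => x.1)) p = id p := by
        intro p hp
        have := (List.mem_filter.1 hp).2
        simp only [beq_iff_eq] at this
        show (p.1, c) = p
        rw [← this]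
      rw [List.map_congr_left hid, List.map_id]
    rw [h2] at h1
    exact h1
  have hstep : ∀ (K : List Int),
      (K.flatMap (fun c => (PySem.List.sorted (pvBucket cnts c) (fun n => n) false).map
        (fun n => (n, c)))).Perm (K.flatMap (fun c => cnts.filter (fun p => p.2 == c))) := by
    intro K
    induction K with
    | nil => simp
    | cons c K' ihK =>
      rw [List.flatMap_cons, List.flatMap_cons]
      exact (hg c).append ihK
  refine (hstep _).trans (pvCover _ cnts ?_ ?_)
  · exact ((PySem.List.sorted_perm (pvDict cnts).keys (fun c => c) true).nodup_iff).2
      (pvDict_keys_nodup cnts)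
  · intro p hp
    rw [PySem.List.mem_sorted, pvDict_keys_mem]
    exact List.mem_map_of_mem hp

theorem pvB_pairwise (cnts : List (String × Int)) : (sort_counts_alt cnts).Pairwise pvR := by
  rw [pvB_eq, List.flatMap_def]
  rw [List.pairwise_flatten]
  have hKge : (PySem.List.sorted (pvDict cnts).keys (fun c => c) true).Pairwise
      (fun a b => b ≤ a) := PySem.List.sorted_pairwise_rev (pvDict cnts).keys (fun c => c)
  have hKnd : (PySem.List.sorted (pvDict cnts).keys (fun c => c) true).Nodup :=
    ((PySem.List.sorted_perm (pvDict cnts).keys (fun c => c) true).nodup_iff).2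
      (pvDict_keys_nodup cnts)
  have hKgt : (PySem.List.sorted (pvDict cnts).keys (fun c => c) true).Pairwise
      (fun a b => b < a) := by
    have := hKge.and hKnd
    exact this.imp (fun h => lt_of_le_of_ne h.1 (Ne.symm h.2))
  constructor
  · intro bl hbl
    rcases List.mem_map.1 hbl with ⟨c, _, rfl⟩
    rw [List.pairwise_map]
    have := PySem.List.sorted_pairwise (pvBucket cnts c) (fun n => n)
    exact this.imp (fun h => Or.inr ⟨rfl, h⟩)
  · rw [List.pairwise_map]
    apply hKgt.imp
    intro c c' hlt x hx y hy
    rcases List.mem_map.1 hx with ⟨n, _, rfl⟩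
    rcases List.mem_map.1 hy with ⟨n', _, rfl⟩
    exact Or.inl hlt

-- ===== VERDICT (by name: the statement is the Claim_ definition above) =====
theorem sort_counts_spec : Claim_equal_sort_counts := by
  intro cnts _
  show sort_counts cnts = sort_counts_alt cnts
  exact List.Perm.eq_of_pairwise (fun a b _ _ => pvR_antisymm a b)
    (pvA_main cnts).2 (pvB_pairwise cnts) ((pvA_main cnts).1.trans (pvB_perm cnts).symm)
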